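-- pv_equiv track=rewrite | github.com/TanakritBenz/spelling-checker | Words_Generator.py | incorrect_vowel
-- ===== SOURCE A (Python) =====
-- def incorrect_vowel_helper(word, pos, letter):
--     newWord = ''
--     for i in range(0, len(word)):
--         if i == pos:
--             newWord += letter
--         else:
--             newWord += word[i]
--     return newWord
--
-- def incorrect_vowel(word, pos, someSet):
--     vowels = 'aeiou'
--     for index in range(pos, len(word)):
--         if word[index] in vowels:
--             for v in vowels:
--                 newWord = incorrect_vowel_helper(word, index, v)
--                 incorrect_vowel(newWord, index+1, someSet)
--                 someSet.add(newWord)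
--     return someSet
-- ===== SOURCE B (Python) =====
-- def incorrect_vowel(word, pos, someSet):
--     vowels = 'aeiou'
--     positions = [i for i in range(max(pos, 0), len(word)) if word[i] in vowels]
--     if not positions:
--         return someSet
--     variants = ['']
--     prev = 0
--     for p in positions:
--         seg = word[prev:p]
--         variants = [base + seg + v for base in variants for v in vowels]
--         prev = p + 1
--     tail = word[prev:]
--     someSet.update(base + tail for base in variants)
--     return someSet
-- ===== Notes on version B (the rewrite author's own statement) =====
-- stated objective: alternative
-- what changed: A re-derives every deeper variant by a fresh recursive call for each of the 5 substitutions at each vowel position; B collects the vowel positions once and builds each variant exactly once by a single left-to-right product loop (the 5^k-sized output dominates, so a timing run shows no measurable speed-up).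
import Mathlib
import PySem

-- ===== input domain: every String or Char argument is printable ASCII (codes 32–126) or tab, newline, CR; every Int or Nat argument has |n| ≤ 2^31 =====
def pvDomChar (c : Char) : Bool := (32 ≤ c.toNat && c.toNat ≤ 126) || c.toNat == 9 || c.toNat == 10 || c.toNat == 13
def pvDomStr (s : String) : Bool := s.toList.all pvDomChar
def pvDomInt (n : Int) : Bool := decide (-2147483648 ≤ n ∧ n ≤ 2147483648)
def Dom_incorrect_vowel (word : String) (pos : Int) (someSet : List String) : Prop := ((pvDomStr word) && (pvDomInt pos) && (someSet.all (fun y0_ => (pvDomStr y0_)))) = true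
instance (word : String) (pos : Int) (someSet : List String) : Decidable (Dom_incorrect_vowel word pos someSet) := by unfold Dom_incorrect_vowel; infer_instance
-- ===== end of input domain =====

-- B replaces A's redundant recursion (a fresh recursive call per substitution per position) with a
-- single left-to-right product build over the vowel positions: each variant is constructed once
-- (an alternative algorithm; the 5^k-sized output dominates, so neither is measurably faster).
-- Python's A mutates the argument set in place; B performs the same mutation (set.update) — the
-- theorems are about the returned value, modelled as a PySem.Set (first-insertion order).

-- ===== PORT A =====
def pvVowels : List Char := ['a', 'e', 'i', 'o', 'u']   -- vowels = 'aeiou'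

def incorrect_vowel_helper (word : String) (pos : Int) (letter : String) : String :=
  -- newWord = ''; for i in range(0, len(word)): newWord += letter if i == pos else word[i]
  String.ofList ((PySem.List.pyRange 0 (PySem.Str.len word) 1).foldl
    (fun nw i => if i = pos then nw ++ letter.toList
      else nw ++ ((PySem.List.pyGet? word.toList i).elim [] (fun c => [c]))) [])
  -- the `.elim []` default is unreachable: i ranges over 0 ≤ i < len(word)

def incorrect_vowel_go (fuel : Nat) (word : String) (pos : Int) (someSet : PySem.Set String) : PySem.Set String :=
  -- body of A; fuel only makes the nested recursion structural (depth ≤ len(word) - pos)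
  match fuel with
  | 0 => someSet
  | f + 1 =>
    (PySem.List.pyRange pos (PySem.Str.len word) 1).foldl (fun s index =>
      match PySem.List.pyGet? word.toList index with
      | none => s   -- unreachable under Pre_: word[index] raises only for pos < -len(word)
      | some c =>
        if pvVowels.contains c then
          pvVowels.foldl (fun s v =>
            let newWord := incorrect_vowel_helper word index (String.ofList [v])
            PySem.Set.add (incorrect_vowel_go f newWord (index + 1) s) newWord) s
        else s) someSet

def incorrect_vowel (word : String) (pos : Int) (someSet : List String) : List String :=
  incorrect_vowel_go ((PySem.Str.len word - pos).toNat + 1) word pos someSet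

-- ===== PORT B =====
def incorrect_vowel_alt (word : String) (pos : Int) (someSet : List String) : List String :=
  let w := word.toList
  -- positions = [i for i in range(max(pos, 0), len(word)) if word[i] in vowels]
  let positions := (PySem.List.pyRange (max pos 0) (PySem.Str.len word) 1).filter
    (fun i => (PySem.List.pyGet? w i).elim false (fun c => pvVowels.contains c))
  if positions.isEmpty then someSet
  else
    -- variants = ['']; for p in positions: variants = [b + word[prev:p] + v ...]; prev = p + 1
    let r := positions.foldl
      (fun (vp : List (List Char) × Int) (p : Int) =>
        (vp.1.flatMap (fun base => pvVowels.map (fun v =>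
            base ++ PySem.List.slice w (some vp.2) (some p) ++ [v])), p + 1))
      ([[]], 0)
    -- someSet.update(b + word[prev:] for b in variants)
    PySem.Set.update someSet
      (r.1.map (fun base => String.ofList (base ++ PySem.List.slice w (some r.2) none)))

-- ===== PRECONDITION & SPEC =====
-- Pre_ excludes exactly the inputs where A raises: pos < -len(word) makes A's first word[pos]
-- an IndexError (negative index before the start of the word).
def Pre_incorrect_vowel (word : String) (pos : Int) (someSet : List String) : Prop :=
  -(word.toList.length : Int) ≤ pos
instance (word : String) (pos : Int) (someSet : List String) : Decidable (Pre_incorrect_vowel word pos someSet) := by unfold Pre_incorrect_vowel; infer_instance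

def pvWitness_incorrect_vowel : String × Int × List String := ("be", 0, ["hi"])

def Spec_incorrect_vowel (word : String) (pos : Int) (someSet : List String) (out : List String) : Prop := out = incorrect_vowel_alt word pos someSet
instance (word : String) (pos : Int) (someSet : List String) (out : List String) : Decidable (Spec_incorrect_vowel word pos someSet out) := by unfold Spec_incorrect_vowel; infer_instance

-- ===== CLAIM (what is proved, stated in full; the proofs are below) =====
def Claim_equal_incorrect_vowel : Prop := ∀ (word : String) (pos : Int) (someSet : List String), Dom_incorrect_vowel word pos someSet → Pre_incorrect_vowel word pos someSet → Spec_incorrect_vowel word pos someSet (incorrect_vowel word pos someSet)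


-- ===== LEMMAS AND PROOFS =====

def pvIsV (c : Char) : Bool := pvVowels.contains c

-- vowel positions of w that are ≥ i, in increasing order
def pvPosns (w : List Char) (i : Nat) : List Nat :=
  if h : i < w.length then
    (if pvIsV w[i] then [i] else []) ++ pvPosns w (i + 1)
  else []
termination_by w.length - i

lemma pvPosns_mem {w : List Char} {i j : Nat} (h : j ∈ pvPosns w i) :
    i ≤ j ∧ ∃ hj : j < w.length, pvIsV (w[j]'hj) := by
  induction i using pvPosns.induct (w := w) with
  | case1 i h1 ih =>
    rw [pvPosns, dif_pos h1] at h
    rcases List.mem_append.1 h with h2 | h2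
    · split at h2
      · simp at h2; subst h2; exact ⟨le_refl _, h1, by assumption⟩
      · simp at h2
    · obtain ⟨a, b⟩ := ih h2; exact ⟨by omega, b⟩
  | case2 i h1 => rw [pvPosns, dif_neg h1] at h; simp at h

lemma pvPosns_nil_of_ge {w : List Char} {i : Nat} (h : w.length ≤ i) : pvPosns w i = [] := by
  unfold pvPosns; rw [dif_neg (by omega)]

lemma pvPosns_skip {w : List Char} {i : Nat} (h : i < w.length) (hv : ¬ pvIsV w[i]) :
    pvPosns w i = pvPosns w (i + 1) := by
  conv_lhs => rw [pvPosns]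
  rw [dif_pos h, if_neg hv]; rfl

lemma pvPosns_vowel {w : List Char} {i : Nat} (h : i < w.length) (hv : pvIsV w[i]) :
    pvPosns w i = i :: pvPosns w (i + 1) := by
  conv_lhs => rw [pvPosns]
  rw [dif_pos h, if_pos hv]; rfl

lemma pvPosns_tail {w : List Char} {i j : Nat} (h : (pvPosns w i).head? = some j) :
    pvPosns w i = j :: pvPosns w (j + 1) := by
  induction i using pvPosns.induct (w := w) with
  | case1 i h1 ih =>
    by_cases hv : pvIsV w[i]
    · rw [pvPosns_vowel h1 hv] at h ⊢
      simp at h; subst h; rfl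
    · rw [pvPosns_skip h1 hv] at h ⊢
      exact ih h
  | case2 i h1 =>
    rw [pvPosns, dif_neg h1] at h; simp at h

lemma pvPosns_mem_of {w : List Char} {j : Nat} (hj : j < w.length) (hv : pvIsV w[j]) :
    ∀ {i : Nat}, i ≤ j → j ∈ pvPosns w i := by
  intro i
  induction i using pvPosns.induct (w := w) with
  | case1 i h1 ih =>
    intro hij
    rcases Nat.eq_or_lt_of_le hij with rfl | hlt
    · rw [pvPosns_vowel hj hv]; simp
    · by_cases hvi : pvIsV w[i]
      · rw [pvPosns_vowel h1 hvi]; exact List.mem_cons_of_mem _ (ih hlt)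
      · rw [pvPosns_skip h1 hvi]; exact ih hlt
  | case2 i h1 => intro hij; omega

lemma pvPosns_set_of_lt {w : List Char} {v : Char} {j : Nat} :
    ∀ {i : Nat}, j < i → pvPosns (w.set j v) i = pvPosns w i := by
  intro i
  induction i using pvPosns.induct (w := w) with
  | case1 i h1 ih =>
    intro hji
    have h1' : i < (w.set j v).length := by simpa using h1
    have hg : (w.set j v)[i]'h1' = w[i]'h1 := by
      rw [List.getElem_set_ne (by omega)]
    by_cases hvi : pvIsV w[i]
    · rw [pvPosns_vowel h1 hvi, pvPosns_vowel h1' (by rw [hg]; exact hvi), ih (by omega)]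
    · rw [pvPosns_skip h1 hvi, pvPosns_skip h1' (by rw [hg]; exact hvi), ih (by omega)]
  | case2 i h1 =>
    intro hji
    rw [pvPosns, dif_neg (show ¬ i < (w.set j v).length by simpa using h1), pvPosns, dif_neg h1]

-- all words obtained from w by substituting every vowel position ≥ i by every vowel, lexicographically
def pvCombos (w : List Char) (i : Nat) : List (List Char) :=
  match h : (pvPosns w i).head? with
  | none => [w]
  | some j => pvVowels.flatMap (fun v => pvCombos (w.set j v) (j + 1))
termination_by w.length - i
decreasing_by
  obtain ⟨hij, hj, -⟩ := pvPosns_mem (List.mem_of_mem_head? h)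
  simp only [List.length_set]
  omega

lemma pvCombos_of_nil {w : List Char} {i : Nat} (h : pvPosns w i = []) :
    pvCombos w i = [w] := by
  rw [pvCombos.eq_def, h]
  simp

lemma pvCombos_head {w : List Char} {i j : Nat} (h : (pvPosns w i).head? = some j) :
    pvCombos w i = pvVowels.flatMap (fun v => pvCombos (w.set j v) (j + 1)) := by
  rw [pvCombos.eq_def, pvPosns_tail h]
  simp

lemma pvCombos_skip {w : List Char} {i : Nat} (h : i < w.length) (hv : ¬ pvIsV w[i]) :
    pvCombos w i = pvCombos w (i + 1) := by
  rw [pvCombos.eq_def, pvCombos.eq_def, pvPosns_skip h hv]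

lemma pvCombos_self {w : List Char} {i : Nat} : w ∈ pvCombos w i := by
  induction w, i using pvCombos.induct with
  | case1 w i h => rw [pvCombos_of_nil (List.head?_eq_none_iff.1 h)]; simp
  | case2 w i j h ih =>
    rw [pvCombos_head h]
    obtain ⟨hij, hj, hv⟩ := pvPosns_mem (List.mem_of_mem_head? h)
    refine List.mem_flatMap.2 ⟨w[j], by simpa [pvIsV] using hv, ?_⟩
    simpa [List.set_getElem_self] using ih (w[j]'hj)

lemma pvCombos_len_take {w : List Char} {i : Nat} :
    ∀ {c : List Char}, c ∈ pvCombos w i → c.length = w.length ∧ c.take i = w.take i := by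
  induction w, i using pvCombos.induct with
  | case1 w i h =>
    intro c hc
    rw [pvCombos_of_nil (List.head?_eq_none_iff.1 h)] at hc
    simp at hc; subst hc; exact ⟨rfl, rfl⟩
  | case2 w i j h ih =>
    intro c hc
    rw [pvCombos_head h] at hc
    obtain ⟨v, hv, hc⟩ := List.mem_flatMap.1 hc
    obtain ⟨hlen, htake⟩ := ih v hc
    obtain ⟨hij, hj, -⟩ := pvPosns_mem (List.mem_of_mem_head? h)
    refine ⟨by simpa using hlen, ?_⟩
    have h1 : c.take i = (c.take (j + 1)).take i := by
      rw [List.take_take, min_eq_left (by omega)]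
    rw [h1, htake, List.take_take, min_eq_left (by omega), List.take_set_of_le (by omega)]

lemma pvCombos_set : ∀ (w : List Char) (i : Nat) {j : Nat} {v : Char}, j < i →
    pvCombos (w.set j v) i = (pvCombos w i).map (fun c => c.set j v) := by
  intro w i
  induction w, i using pvCombos.induct with
  | case1 w i h =>
    intro j v hji
    have hn : pvPosns w i = [] := List.head?_eq_none_iff.1 h
    rw [pvCombos_of_nil hn, pvCombos_of_nil (by rw [pvPosns_set_of_lt hji, hn])]
    simp
  | case2 w i p h ih =>
    intro j v hji
    obtain ⟨hip, hp, -⟩ := pvPosns_mem (List.mem_of_mem_head? h)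
    have h' : (pvPosns (w.set j v) i).head? = some p := by
      rw [pvPosns_set_of_lt hji]; exact h
    rw [pvCombos_head h', pvCombos_head h, List.map_flatMap]
    have hstep : ∀ u : Char, pvCombos ((w.set j v).set p u) (p + 1)
        = (pvCombos (w.set p u) (p + 1)).map (fun c => c.set j v) := by
      intro u
      rw [List.set_comm _ _ (by omega : j ≠ p)]
      exact ih u (by omega)
    simp only [hstep]

lemma pvCombos_sub {w : List Char} {i : Nat} (h : i < w.length) (hv : pvIsV w[i]) :
    ∀ c ∈ pvCombos w (i + 1), c ∈ pvCombos w i := by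
  intro c hc
  rw [pvCombos_head (by rw [pvPosns_vowel h hv]; rfl)]
  refine List.mem_flatMap.2 ⟨w[i], by simpa [pvIsV] using hv, ?_⟩
  rwa [List.set_getElem_self]

def pvCL (w : List Char) (i : Nat) : List (List Char) :=
  if pvPosns w i = [] then [] else pvCombos w i

lemma pvUpdate_nil (s : PySem.Set String) : PySem.Set.update s [] = s := rfl

lemma pvUpdate_absorb {s : PySem.Set String} {l : List String} (h : ∀ x ∈ l, x ∈ s) :
    PySem.Set.update s l = s := by
  induction l generalizing s with
  | nil => rfl
  | cons x t ih =>
    show PySem.Set.update (PySem.Set.add s x) t = s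
    rw [PySem.Set.add_of_mem (h x (by simp))]
    exact ih fun y hy => h y (by simp [hy])

-- Python word[i] for a negative in-range index
lemma pvGetNeg {w : List Char} {i : Int} (h1 : -(w.length : Int) ≤ i) (h2 : i < 0) :
    ∃ hq : w.length - (-i).toNat < w.length,
      PySem.List.pyGet? w i = some (w[w.length - (-i).toNat]'hq) := by
  have hq : w.length - (-i).toNat < w.length := by omega
  refine ⟨hq, ?_⟩
  simp only [PySem.List.pyGet?, PySem.List.pyIdx?, if_neg (by omega : ¬ (0 : Int) ≤ i),
    if_pos h1, Option.bind_some, List.getElem?_eq_getElem hq]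

lemma pvHelper_core (w : List Char) (j : Int) (v : Char) :
    incorrect_vowel_helper (String.ofList w) j (String.ofList [v])
      = String.ofList ((List.range w.length).map
          (fun (k : Nat) => if (k : Int) = j then v else w.getD k 'a')) := by
  unfold incorrect_vowel_helper
  congr 1
  have hb : (fun (nw : List Char) (i : Int) =>
        if i = j then nw ++ (String.ofList [v]).toList
        else nw ++ ((PySem.List.pyGet? (String.ofList w).toList i).elim [] (fun c => [c])))
      = (fun (nw : List Char) (i : Int) => nw ++
          (if i = j then [v] else ((PySem.List.pyGet? w i).elim [] (fun c => [c])))) := by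
    funext nw i
    simp only [String.toList_ofList]
    split <;> rfl
  rw [hb, PySem.List.foldl_append_eq_flatMap]
  have hlen : PySem.Str.len (String.ofList w) = (w.length : Int) := by
    rw [PySem.Str.len_eq, String.toList_ofList]
  rw [hlen, PySem.List.pyRange_zero_natCast, List.flatMap_map, List.nil_append]
  calc List.flatMap ((fun i => if i = j then [v]
            else ((PySem.List.pyGet? w i).elim [] (fun c => [c]))) ∘ Nat.cast) (List.range w.length)
      = List.flatMap (fun k : Nat => [if (k : Int) = j then v else w.getD k 'a'])
          (List.range w.length) := by
        apply List.flatMap_congr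
        intro k hk
        have hk' : k < w.length := List.mem_range.1 hk
        simp only [Function.comp_apply, PySem.List.pyGet?_natCast, List.getElem?_eq_getElem hk',
          List.getD_eq_getElem w 'a' hk']
        split <;> rfl
    _ = (List.range w.length).map (fun (k : Nat) => if (k : Int) = j then v else w.getD k 'a') :=
        Eq.symm List.map_eq_flatMap

lemma pvHelper_set {w : List Char} {j : Int} {v : Char} (h0 : 0 ≤ j) (hl : j < (w.length : Int)) :
    incorrect_vowel_helper (String.ofList w) j (String.ofList [v]) =
      String.ofList (w.set j.toNat v) := by
  rw [pvHelper_core]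
  congr 1
  apply List.ext_getElem
  · simp
  · intro t h1 h2
    simp only [List.getElem_map, List.getElem_range, List.getElem_set]
    have h1' : t < w.length := by simpa using h1
    rw [List.getD_eq_getElem w 'a' h1']
    by_cases ht : (t : Int) = j
    · rw [if_pos ht, if_pos (by omega)]
    · rw [if_neg ht, if_neg (by omega)]

lemma pvHelper_id {w : List Char} {j : Int} {v : Char} (h : j < 0) :
    incorrect_vowel_helper (String.ofList w) j (String.ofList [v]) = String.ofList w := by
  rw [pvHelper_core]
  congr 1
  apply List.ext_getElem
  · simp
  · intro t h1 h2
    simp only [List.getElem_map, List.getElem_range]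
    rw [if_neg (by omega), List.getD_eq_getElem w 'a' h2]

lemma pvMemUpdate {s : PySem.Set String} {l : List String} {x : String} (h : x ∈ l) :
    x ∈ PySem.Set.update s l := (PySem.Set.mem_update s l x).2 (Or.inr h)

-- the body of A's outer loop, with the `let` substituted (definitionally equal)
def pvBody (f : Nat) (word : String) : PySem.Set String → Int → PySem.Set String :=
  fun s index =>
    match PySem.List.pyGet? word.toList index with
    | none => s
    | some c =>
      if pvVowels.contains c then
        pvVowels.foldl (fun s v =>
          PySem.Set.add
            (incorrect_vowel_go f (incorrect_vowel_helper word index (String.ofList [v])) (index + 1) s)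
            (incorrect_vowel_helper word index (String.ofList [v]))) s
      else s

lemma pvGo_unfold (f : Nat) (word : String) (pos : Int) (s : PySem.Set String) :
    incorrect_vowel_go (f + 1) word pos s
      = (PySem.List.pyRange pos (PySem.Str.len word) 1).foldl (pvBody f word) s := rfl

-- A's fueled recursion computes: append (dedup) all combos from position max(pos,0)
lemma pvGoA (m : Nat) : ∀ (w : List Char) (pos : Int) (f : Nat) (s : List String),
    ((w.length : Int) - pos).toNat = m → -(w.length : Int) ≤ pos →
    ((w.length : Int) - pos).toNat < f →
    incorrect_vowel_go f (String.ofList w) pos s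
      = PySem.Set.update s ((pvCL w pos.toNat).map String.ofList) := by
  induction m using Nat.strong_induction_on with
  | _ m ihm =>
  intro w pos f s hm hpre hf
  obtain ⟨f', rfl⟩ : ∃ f'', f = f'' + 1 := ⟨f - 1, by omega⟩
  have hlen : PySem.Str.len (String.ofList w) = (w.length : Int) := by
    rw [PySem.Str.len_eq, String.toList_ofList]
  rw [pvGo_unfold, hlen]
  by_cases hge : (w.length : Int) ≤ pos
  · rw [PySem.List.pyRange_one_eq_nil hge, List.foldl_nil,
      pvCL, if_pos (pvPosns_nil_of_ge (by omega)), List.map_nil, pvUpdate_nil]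
  · have hlt : pos < (w.length : Int) := by omega
    rw [PySem.List.pyRange_one_cons hlt, List.foldl_cons]
    have hback : ∀ s' : PySem.Set String,
        (PySem.List.pyRange (pos + 1) ((w.length : Int)) 1).foldl (pvBody f' (String.ofList w)) s'
          = incorrect_vowel_go (f' + 1) (String.ofList w) (pos + 1) s' := by
      intro s'
      rw [pvGo_unfold, hlen]
    by_cases hneg : pos < 0
    · -- negative index: word[pos] reads w[len + pos]; the helper's i == pos never matches
      obtain ⟨hqlt, hget⟩ := pvGetNeg hpre hneg
      have h01 : (pos + 1).toNat = 0 := by omega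
      have h00 : pos.toNat = 0 := by omega
      by_cases hv : pvIsV (w[w.length - (-pos).toNat]'hqlt)
      · have hne : pvPosns w 0 ≠ [] := by
          intro hcon
          have hmem := pvPosns_mem_of hqlt hv (Nat.zero_le _)
          rw [hcon] at hmem
          simp at hmem
        have hCL0 : pvCL w 0 = pvCombos w 0 := by rw [pvCL, if_neg hne]
        have hfoldneg : ∀ (vl : List Char) (s' : PySem.Set String), vl ≠ [] →
            vl.foldl (fun s'' v =>
              PySem.Set.add
                (incorrect_vowel_go f'
                  (incorrect_vowel_helper (String.ofList w) pos (String.ofList [v])) (pos + 1) s'')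
                (incorrect_vowel_helper (String.ofList w) pos (String.ofList [v]))) s'
              = PySem.Set.update s' ((pvCombos w 0).map String.ofList) := by
          intro vl
          induction vl with
          | nil => intro s' hcon; exact absurd rfl hcon
          | cons v vl ihv =>
            intro s' _
            simp only [List.foldl_cons]
            rw [pvHelper_id hneg,
              ihm (((w.length : Int)) - (pos + 1)).toNat (by omega) w (pos + 1) f' s' rfl
                (by omega) (by omega), h01, hCL0,
              PySem.Set.add_of_mem (pvMemUpdate (List.mem_map.2 ⟨w, pvCombos_self, rfl⟩))]
            by_cases hvl : vl = []
            · subst hvl; rw [List.foldl_nil]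
            · rw [ihv _ hvl]
              exact pvUpdate_absorb (fun x hx => pvMemUpdate hx)
        have hbody : pvBody f' (String.ofList w) s pos
            = PySem.Set.update s ((pvCombos w 0).map String.ofList) := by
          simp only [pvBody, String.toList_ofList, hget]
          rw [if_pos (show pvVowels.contains _ = true from hv)]
          exact hfoldneg pvVowels s (by simp [pvVowels])
        rw [hback, hbody,
          ihm (((w.length : Int)) - (pos + 1)).toNat (by omega) w (pos + 1) (f' + 1) _ rfl
            (by omega) (by omega), h01, hCL0,
          pvUpdate_absorb (fun x hx => pvMemUpdate hx), h00, hCL0]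
      · have hbody : pvBody f' (String.ofList w) s pos = s := by
          simp only [pvBody, String.toList_ofList, hget]
          rw [if_neg (show ¬ pvVowels.contains _ = true from hv)]
        rw [hback, hbody,
          ihm (((w.length : Int)) - (pos + 1)).toNat (by omega) w (pos + 1) (f' + 1) s rfl
            (by omega) (by omega), h01, h00]
    · -- pos ≥ 0
      have hq : pos.toNat < w.length := by omega
      have hget : PySem.List.pyGet? w pos = some (w[pos.toNat]'hq) := by
        have h2 : PySem.List.pyGet? w ((pos.toNat : Nat) : Int) = some (w[pos.toNat]'hq) := by
          rw [PySem.List.pyGet?_natCast, List.getElem?_eq_getElem hq]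
        rwa [show ((pos.toNat : Nat) : Int) = pos by omega] at h2
      have h1t : (pos + 1).toNat = pos.toNat + 1 := by omega
      by_cases hv : pvIsV (w[pos.toNat]'hq)
      · have hposn : pvPosns w pos.toNat = pos.toNat :: pvPosns w (pos.toNat + 1) :=
          pvPosns_vowel hq hv
        have hCLq : pvCL w pos.toNat = pvCombos w pos.toNat := by
          rw [pvCL, if_neg (by rw [hposn]; simp)]
        have hcomb : pvCombos w pos.toNat
            = pvVowels.flatMap (fun v => pvCombos (w.set pos.toNat v) (pos.toNat + 1)) :=
          pvCombos_head (by rw [hposn]; rfl)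
        have hfoldpos : ∀ (vl : List Char) (s' : PySem.Set String),
            vl.foldl (fun s'' v =>
              PySem.Set.add
                (incorrect_vowel_go f'
                  (incorrect_vowel_helper (String.ofList w) pos (String.ofList [v])) (pos + 1) s'')
                (incorrect_vowel_helper (String.ofList w) pos (String.ofList [v]))) s'
              = PySem.Set.update s'
                  ((vl.flatMap (fun v => pvCombos (w.set pos.toNat v) (pos.toNat + 1))).map
                    String.ofList) := by
          intro vl
          induction vl with
          | nil => intro s'; rfl
          | cons v vl ihv =>
            intro s'
            simp only [List.foldl_cons]
            rw [ihv, List.flatMap_cons, List.map_append, PySem.Set.update_append]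
            congr 1
            rw [pvHelper_set (by omega) hlt,
              ihm (((w.length : Int)) - (pos + 1)).toNat (by omega) (w.set pos.toNat v) (pos + 1)
                f' s' (by rw [List.length_set]) (by rw [List.length_set]; omega)
                (by rw [List.length_set]; omega), h1t]
            by_cases hz : pvPosns (w.set pos.toNat v) (pos.toNat + 1) = []
            · rw [pvCL, if_pos hz, List.map_nil, pvUpdate_nil, pvCombos_of_nil hz]
              rfl
            · rw [pvCL, if_neg hz,
                PySem.Set.add_of_mem
                  (pvMemUpdate (List.mem_map.2 ⟨w.set pos.toNat v, pvCombos_self, rfl⟩))]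
        have hbody : pvBody f' (String.ofList w) s pos
            = PySem.Set.update s ((pvCombos w pos.toNat).map String.ofList) := by
          simp only [pvBody, String.toList_ofList, hget]
          rw [if_pos (show pvVowels.contains _ = true from hv), hfoldpos pvVowels s, ← hcomb]
        rw [hback, hbody,
          ihm (((w.length : Int)) - (pos + 1)).toNat (by omega) w (pos + 1) (f' + 1) _ rfl
            (by omega) (by omega), h1t, hCLq]
        by_cases hz2 : pvPosns w (pos.toNat + 1) = []
        · rw [pvCL, if_pos hz2, List.map_nil, pvUpdate_nil]
        · rw [pvCL, if_neg hz2]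
          exact pvUpdate_absorb (fun x hx => by
            obtain ⟨c, hc, rfl⟩ := List.mem_map.1 hx
            exact pvMemUpdate (List.mem_map.2 ⟨c, pvCombos_sub hq hv c hc, rfl⟩))
      · have hbody : pvBody f' (String.ofList w) s pos = s := by
          simp only [pvBody, String.toList_ofList, hget]
          rw [if_neg (show ¬ pvVowels.contains _ = true from hv)]
        rw [hback, hbody,
          ihm (((w.length : Int)) - (pos + 1)).toNat (by omega) w (pos + 1) (f' + 1) s rfl
            (by omega) (by omega), h1t]
        have hskip : pvCL w pos.toNat = pvCL w (pos.toNat + 1) := by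
          rw [pvCL, pvCL, pvPosns_skip hq hv, pvCombos_skip hq hv]
        rw [hskip]

-- B's position list is the Nat vowel-position list
lemma pvPositions (w : List Char) : ∀ (i : Nat),
    (PySem.List.pyRange (i : Int) (w.length : Int) 1).filter
      (fun k => (PySem.List.pyGet? w k).elim false (fun c => pvVowels.contains c))
    = (pvPosns w i).map Nat.cast := by
  intro i
  induction i using pvPosns.induct (w := w) with
  | case1 i h1 ih =>
    rw [PySem.List.pyRange_one_cons (by exact_mod_cast h1), List.filter_cons]
    have hget : PySem.List.pyGet? w (i : Int) = some (w[i]'h1) := by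
      rw [PySem.List.pyGet?_natCast, List.getElem?_eq_getElem h1]
    rw [hget]
    by_cases hv : pvIsV w[i]
    · rw [if_pos (by simpa [pvIsV] using hv), pvPosns_vowel h1 hv]
      have : ((i : Int) + 1) = ((i + 1 : Nat) : Int) := by push_cast; ring
      rw [this, ih]
      rfl
    · rw [if_neg (by simpa [pvIsV] using hv), pvPosns_skip h1 hv]
      have : ((i : Int) + 1) = ((i + 1 : Nat) : Int) := by push_cast; ring
      rw [this, ih]
  | case2 i h1 =>
    rw [PySem.List.pyRange_one_eq_nil (by exact_mod_cast Nat.le_of_not_lt h1),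
      pvPosns_nil_of_ge (Nat.le_of_not_lt h1)]
    rfl

-- the step of B's product loop, over Nat positions
def pvStep (w : List Char) : (List (List Char) × Int) → Nat → (List (List Char) × Int) :=
  fun vp p => (vp.1.flatMap (fun base => pvVowels.map (fun v =>
      base ++ PySem.List.slice w (some vp.2) (some (p : Int)) ++ [v])), (p : Int) + 1)

-- B's product fold builds exactly the combos
lemma pvBuild (w : List Char) : ∀ (n i : Nat) (vs : List (List Char)) (prev : Nat),
    w.length - i = n → prev ≤ i →
    ((pvPosns w i).foldl (pvStep w) (vs, (prev : Int))).1.map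
        (fun base => base ++
          PySem.List.slice w (some ((pvPosns w i).foldl (pvStep w) (vs, (prev : Int))).2) none)
      = vs.flatMap (fun base => (pvCombos w i).map (fun c => base ++ c.drop prev)) := by
  intro n
  induction n using Nat.strong_induction_on with
  | _ n ih =>
  intro i vs prev hn hpi
  cases hh : (pvPosns w i).head? with
  | none =>
    have hnil : pvPosns w i = [] := List.head?_eq_none_iff.1 hh
    rw [hnil, pvCombos_of_nil hnil]
    simp only [List.foldl_nil]
    rw [PySem.List.slice_from_natCast]
    simp [List.map_eq_flatMap]
  | some j =>
    obtain ⟨hij, hj, hv⟩ := pvPosns_mem (List.mem_of_mem_head? hh)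
    rw [pvPosns_tail hh, List.foldl_cons, pvCombos_head hh]
    have hstep : pvStep w (vs, (prev : Int)) j
        = (vs.flatMap (fun base => pvVowels.map (fun v =>
            base ++ ((w.drop prev).take (j - prev)) ++ [v])), ((j + 1 : Nat) : Int)) := by
      unfold pvStep
      rw [PySem.List.slice_natCast]
      exact congrArg _ (by push_cast; ring)
    rw [hstep]
    rw [ih (w.length - (j + 1)) (by omega) (j + 1) _ (j + 1) rfl (le_refl _)]
    have hR : ∀ b : List Char,
        ((pvVowels.flatMap (fun v => pvCombos (w.set j v) (j + 1))).map (fun c => b ++ c.drop prev))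
        = pvVowels.flatMap (fun v => (pvCombos w (j + 1)).map (fun c =>
            (b ++ (w.drop prev).take (j - prev) ++ [v]) ++ c.drop (j + 1))) := by
      intro b
      rw [List.map_flatMap]
      apply List.flatMap_congr
      intro v hvv
      rw [pvCombos_set w (j + 1) (by omega), List.map_map]
      apply List.map_congr_left
      intro c hc
      obtain ⟨hcl, hct⟩ := pvCombos_len_take hc
      simp only [Function.comp_apply]
      have hjc : j < c.length := by omega
      rw [List.set_eq_take_cons_drop v hjc,
        List.drop_append_of_le_length (by rw [List.length_take]; omega)]
      have hct' : c.take j = w.take j := by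
        have h2 := congrArg (List.take j) hct
        rw [List.take_take, List.take_take] at h2
        simpa [Nat.min_def] using h2
      rw [hct', List.drop_take]
      simp [List.append_assoc]
    simp only [hR]
    rw [List.flatMap_assoc]
    simp only [List.flatMap_map]

lemma pvAltB (word : String) (pos : Int) (someSet : List String) :
    incorrect_vowel_alt word pos someSet
      = PySem.Set.update someSet ((pvCL word.toList pos.toNat).map String.ofList) := by
  simp only [incorrect_vowel_alt]
  rw [PySem.Str.len_eq, ← Int.ofNat_toNat pos, pvPositions word.toList pos.toNat]
  by_cases hnil : pvPosns word.toList pos.toNat = []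
  · rw [hnil]
    simp [pvCL, hnil]
  · rw [if_neg (by simp [hnil])]
    rw [List.foldl_map]
    have hfold : ∀ (init : List (List Char) × Int),
        List.foldl (fun (vp : List (List Char) × Int) (p : Nat) =>
          (vp.1.flatMap (fun base => pvVowels.map (fun v =>
              base ++ PySem.List.slice word.toList (some vp.2) (some ((p : Nat) : Int)) ++ [v])),
            ((p : Nat) : Int) + 1)) init (pvPosns word.toList pos.toNat)
          = List.foldl (pvStep word.toList) init (pvPosns word.toList pos.toNat) := by
      intro init; rfl
    rw [hfold]
    set r := List.foldl (pvStep word.toList) ([[]], (0 : Int)) (pvPosns word.toList pos.toNat)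
      with hr
    have hmm := pvBuild word.toList (word.toList.length - pos.toNat) pos.toNat [[]] 0 rfl
      (Nat.zero_le _)
    rw [Nat.cast_zero] at hmm
    rw [← hr] at hmm
    have h3 : ∀ (l : List (List Char)) (t : List Char),
        l.map (fun b => String.ofList (b ++ t)) = (l.map (fun b => b ++ t)).map String.ofList := by
      intro l t
      rw [List.map_map]
      rfl
    rw [h3, hmm]
    have hone : ([[]] : List (List Char)).flatMap
        (fun base => (pvCombos word.toList pos.toNat).map (fun c => base ++ c.drop 0))
        = pvCombos word.toList pos.toNat := by
      simp
    rw [hone, pvCL, if_neg hnil]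

-- ===== VERDICT (by name: the statement is the Claim_ definition above) =====
theorem incorrect_vowel_spec : Claim_equal_incorrect_vowel := by
  intro word pos someSet _ hpre
  show incorrect_vowel word pos someSet = incorrect_vowel_alt word pos someSet
  rw [pvAltB]
  have hw : String.ofList word.toList = word := by simp
  calc incorrect_vowel word pos someSet
      = incorrect_vowel_go ((PySem.Str.len word - pos).toNat + 1) (String.ofList word.toList) pos someSet := by
        rw [hw]; rfl
    _ = PySem.Set.update someSet ((pvCL word.toList pos.toNat).map String.ofList) := by
        apply pvGoA (((word.toList.length : Int) - pos).toNat)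
        · rfl
        · exact hpre
        · simp [PySem.Str.len_eq]
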